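-- pv_equiv track=rewrite | github.com/Daniela-Naraai-Caamal-Ake/investigacion-historica | src/utilidades.py | detectar_duplicados
-- ===== SOURCE A (Python) =====
-- def detectar_duplicados(elementos, campo):
--     """
--     Detecta registros duplicados en una colección JSON según un campo clave.
--
--     Args:
--         elementos (list[dict]): Lista de registros a analizar.
--         campo (str): Nombre del campo cuyo valor se usa para detectar duplicados.
--
--     Returns:
--         dict[str, list[dict]]: Diccionario ``{valor: [registros]}``.
--             Solo incluye entradas donde el valor aparece más de una vez.
--     """
--     conteo = {}
--     for elem in elementos:
--         valor = elem.get(campo)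
--         if valor is None:
--             continue
--         clave = str(valor)
--         conteo.setdefault(clave, []).append(elem)
--     return {k: v for k, v in conteo.items() if len(v) > 1}
-- ===== SOURCE B (Python) =====
-- def detectar_duplicados(elementos, campo):
--     # Two-pass: count key occurrences first, then build only the duplicated groups.
--     conteo = {}
--     for elem in elementos:
--         valor = elem.get(campo)
--         if valor is None:
--             continue
--         clave = str(valor)
--         conteo[clave] = conteo.get(clave, 0) + 1
--     resultado = {}
--     for elem in elementos:
--         valor = elem.get(campo)
--         if valor is None:
--             continue
--         clave = str(valor)
--         if conteo[clave] > 1: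
--             resultado.setdefault(clave, []).append(elem)
--     return resultado
-- ===== Notes on version B (the rewrite author's own statement) =====
-- stated objective: alternative
-- what changed: B replaces A's single grouping pass (build every group, then filter groups of length > 1) with a first pass that only counts key occurrences and a second pass that appends an element to the result only when its key's count exceeds 1.
import Mathlib
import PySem

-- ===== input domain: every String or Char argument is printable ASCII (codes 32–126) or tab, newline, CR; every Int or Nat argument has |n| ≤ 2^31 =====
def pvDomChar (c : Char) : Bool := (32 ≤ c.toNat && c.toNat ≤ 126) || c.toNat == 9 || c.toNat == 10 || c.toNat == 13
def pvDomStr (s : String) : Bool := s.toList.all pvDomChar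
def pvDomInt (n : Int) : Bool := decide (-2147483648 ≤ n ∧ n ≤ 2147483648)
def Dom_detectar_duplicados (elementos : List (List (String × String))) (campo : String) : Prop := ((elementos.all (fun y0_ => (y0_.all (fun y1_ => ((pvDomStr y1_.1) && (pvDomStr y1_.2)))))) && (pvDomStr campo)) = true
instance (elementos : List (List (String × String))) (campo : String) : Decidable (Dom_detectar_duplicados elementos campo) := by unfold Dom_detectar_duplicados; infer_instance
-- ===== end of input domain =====

-- B replaces A's build-all-groups-then-filter with a counting pass followed by a second pass
-- that only collects elements whose key occurs more than once (objective: alternative decomposition).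

-- ===== PORT A =====
-- A: one grouping dict (setdefault+append, ported as Dict.modify) over all elements, then a
-- filter comprehension keeping the groups of length > 1.
-- Values are strings here, so Python's str(valor) is valor itself.
def detectar_duplicados (elementos : List (List (String × String))) (campo : String) : List (String × List (List (String × String))) :=
  let conteo : PySem.Dict String (List (List (String × String))) :=
    elementos.foldl (fun d elem =>
      match (PySem.Dict.mk elem).get? campo with
      | none => d                       -- valor is None: continue
      | some valor => PySem.Dict.modify d valor [] (· ++ [elem]))  -- conteo.setdefault(clave, []).append(elem)
      PySem.Dict.empty
  conteo.items.filter (fun kv => 1 < kv.2.length)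

-- ===== PORT B =====
-- B: first loop counts occurrences of each key; second loop appends an element to resultado
-- only when its key's count exceeds 1; resultado is returned as built.
def detectar_duplicados_alt (elementos : List (List (String × String))) (campo : String) : List (String × List (List (String × String))) :=
  let conteo : PySem.Dict String Int :=
    elementos.foldl (fun d elem =>
      match (PySem.Dict.mk elem).get? campo with
      | none => d
      | some valor => PySem.Dict.insert d valor (PySem.Dict.getD d valor 0 + 1))  -- conteo[clave] = conteo.get(clave, 0) + 1
      PySem.Dict.empty
  let resultado : PySem.Dict String (List (List (String × String))) :=
    elementos.foldl (fun r elem =>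
      match (PySem.Dict.mk elem).get? campo with
      | none => r
      | some valor =>
        if 1 < PySem.Dict.getD conteo valor 0 then PySem.Dict.modify r valor [] (· ++ [elem]) else r)
      PySem.Dict.empty
  resultado.items

-- ===== PRECONDITION & SPEC =====
def Spec_detectar_duplicados (elementos : List (List (String × String))) (campo : String) (out : List (String × List (List (String × String)))) : Prop := out = detectar_duplicados_alt elementos campo
instance (elementos : List (List (String × String))) (campo : String) (out : List (String × List (List (String × String)))) : Decidable (Spec_detectar_duplicados elementos campo out) := by unfold Spec_detectar_duplicados; infer_instance

-- ===== CLAIM (what is proved, stated in full; the proofs are below) =====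
def Claim_equal_detectar_duplicados : Prop := ∀ (elementos : List (List (String × String))) (campo : String), Dom_detectar_duplicados elementos campo → Spec_detectar_duplicados elementos campo (detectar_duplicados elementos campo)

-- ===== LEMMAS AND PROOFS =====

-- the (key, element) pairs actually processed by either loop (None-keyed elements skipped)
def pvKeyed (elementos : List (List (String × String))) (campo : String) : List (String × List (String × String)) :=
  elementos.filterMap (fun elem => ((PySem.Dict.mk elem).get? campo).map (fun v => (v, elem)))

-- the grouping loop shape shared by A's loop and B's second loop
def pvGrp (l : List (String × List (String × String))) : PySem.Dict String (List (List (String × String))) :=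
  l.foldl (fun d p => PySem.Dict.modify d p.1 [] (· ++ [p.2])) PySem.Dict.empty

-- a loop over elementos that skips None keys is a loop over pvKeyed
lemma pvFoldl_keyed {γ : Type} (elementos : List (List (String × String))) (campo : String)
    (g : γ → String → List (String × String) → γ) (init : γ) :
    elementos.foldl (fun d elem =>
        match (PySem.Dict.mk elem).get? campo with
        | none => d
        | some valor => g d valor elem) init
      = (pvKeyed elementos campo).foldl (fun d p => g d p.1 p.2) init := by
  induction elementos generalizing init with
  | nil => rfl
  | cons elem rest ih =>
    rw [pvKeyed] at ih ⊢
    cases h : (PySem.Dict.mk elem).get? campo <;>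
      simp only [List.foldl_cons, List.filterMap_cons, h, Option.map_some, Option.map_none] <;>
      rw [ih]

lemma pvA_norm (elementos : List (List (String × String))) (campo : String) :
    detectar_duplicados elementos campo =
      (pvGrp (pvKeyed elementos campo)).items.filter (fun kv => 1 < kv.2.length) := by
  unfold detectar_duplicados
  dsimp only
  rw [pvFoldl_keyed elementos campo (fun d valor elem => PySem.Dict.modify d valor [] (· ++ [elem]))]
  rfl

lemma pvB_norm (elementos : List (List (String × String))) (campo : String) :
    detectar_duplicados_alt elementos campo =
      (pvGrp ((pvKeyed elementos campo).filter
        (fun p => decide (1 < ((((pvKeyed elementos campo).map (·.1)).count p.1 : Nat) : Int))))).items := by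
  unfold detectar_duplicados_alt
  dsimp only
  rw [pvFoldl_keyed elementos campo
    (fun d valor _ => PySem.Dict.insert d valor (PySem.Dict.getD d valor 0 + 1))]
  have hcnt : ∀ v : String, PySem.Dict.getD
      ((pvKeyed elementos campo).foldl
        (fun d p => PySem.Dict.insert d p.1 (PySem.Dict.getD d p.1 0 + 1))
        (PySem.Dict.empty : PySem.Dict String Int)) v 0
      = ((((pvKeyed elementos campo).map (·.1)).count v : Nat) : Int) := by
    intro v
    rw [List.foldl_map (f := fun p : String × List (String × String) => p.1)
        (g := fun d x => PySem.Dict.insert d x (PySem.Dict.getD d x 0 + 1)) |>.symm]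
    rw [PySem.Dict.getD_foldl_insert_add_one]
    simp
  simp only [hcnt]
  rw [pvFoldl_keyed elementos campo
    (fun r valor elem =>
      if 1 < ((((pvKeyed elementos campo).map (·.1)).count valor : Nat) : Int)
      then PySem.Dict.modify r valor [] (· ++ [elem]) else r)]
  rw [pvGrp, List.foldl_filter]
  have h : (fun (r : PySem.Dict String (List (List (String × String)))) (p : String × List (String × String)) =>
      if (decide (1 < ((((pvKeyed elementos campo).map (·.1)).count p.1 : Nat) : Int))) = true
      then PySem.Dict.modify r p.1 [] (· ++ [p.2]) else r)
      = (fun r p =>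
      if 1 < ((((pvKeyed elementos campo).map (·.1)).count p.1 : Nat) : Int)
      then PySem.Dict.modify r p.1 [] (· ++ [p.2]) else r) := by
    funext r p; simp
  rw [h]

-- the grouping dict, characterised: keys in first-appearance order, values the matching elements
lemma pvGrp_items (l : List (String × List (String × String))) :
    (pvGrp l).items =
      (PySem.Set.ofList (l.map (·.1))).map
        (fun k => (k, (l.filter (fun p => p.1 == k)).map (·.2))) := by
  have hkeys : (pvGrp l).keys = PySem.Set.ofList (l.map (·.1)) := by
    unfold pvGrp
    rw [PySem.Dict.keys_foldl_modify_key]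
    simp [PySem.Set.update_nil_left]
  have hnd : (pvGrp l).keys.Nodup := by
    rw [hkeys]; exact PySem.Set.nodup_ofList _
  have hget : ∀ k, (pvGrp l).getD k [] = (l.filter (fun p => p.1 == k)).map (·.2) := by
    intro k
    unfold pvGrp
    rw [PySem.Dict.getD_foldl_modify_append]
    simp
  rw [PySem.Dict.items_eq_map_keys _ hnd []]
  rw [hkeys]
  exact List.map_congr_left (fun k _ => by rw [hget k])

lemma pvFilter_discard {α : Type} [BEq α] [LawfulBEq α] (q : α → Bool) (s : List α) (x : α) :
    List.filter q (PySem.Set.discard s x) = PySem.Set.discard (List.filter q s) x := by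
  simp [PySem.Set.discard, List.filter_filter, Bool.and_comm]

lemma pvSet_ofList_filter {α : Type} [BEq α] [LawfulBEq α] (q : α → Bool) (l : List α) :
    PySem.Set.ofList (l.filter q) = (PySem.Set.ofList l).filter q := by
  induction l with
  | nil => rfl
  | cons x xs ih =>
    rw [PySem.Set.ofList_cons, List.filter_cons]
    by_cases hx : q x = true
    · rw [if_pos hx, PySem.Set.ofList_cons, ih, List.filter_cons, hx, ← pvFilter_discard]
      simp
    · have hx' : q x = false := by simpa using hx
      rw [if_neg hx, ih, List.filter_cons, hx']
      simp only [if_neg (by simp : ¬ (false = true))]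
      simp only [PySem.Set.discard, List.filter_filter]
      refine (List.filter_congr ?_).symm
      intro a _
      rcases h : q a with _ | _
      · simp
      · simp only [Bool.true_and]
        have : a ≠ x := fun e => by subst e; rw [h] at hx'; cases hx'
        simp [this]

theorem pvMain (elementos : List (List (String × String))) (campo : String) :
    detectar_duplicados elementos campo = detectar_duplicados_alt elementos campo := by
  rw [pvA_norm, pvB_norm, pvGrp_items, pvGrp_items]
  set ps := pvKeyed elementos campo with hps
  set ks := ps.map (·.1) with hks
  have hlen : ∀ k, ((ps.filter (fun p => p.1 == k)).map (·.2)).length = ks.count k := by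
    intro k
    rw [List.length_map, ← List.countP_eq_length_filter, hks, List.count, List.countP_map]
    rfl
  rw [List.filter_map]
  have hq : ((fun kv : String × List (List (String × String)) => decide (1 < kv.2.length)) ∘
      (fun k => (k, (ps.filter (fun p => p.1 == k)).map (·.2))))
      = (fun k => decide (1 < ((ks.count k : Nat) : Int))) := by
    funext k
    simp only [Function.comp_apply, hlen k]
    simp
  rw [hq]
  have hmap1 : (ps.filter (fun p => decide (1 < ((ks.count p.1 : Nat) : Int)))).map (·.1)
      = ks.filter (fun k => decide (1 < ((ks.count k : Nat) : Int))) := by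
    rw [hks, List.filter_map]
    rfl
  rw [hmap1, pvSet_ofList_filter]
  apply List.map_congr_left
  intro k hk
  have hk2 : 1 < ks.count k := by
    have := (List.mem_filter.mp hk).2
    simpa using this
  congr 1
  rw [List.filter_filter]
  refine congrArg _ (List.filter_congr ?_)
  intro p _
  rcases h : (p.1 == k) with _ | _
  · simp
  · have : p.1 = k := by simpa using h
    simp [this, hk2]

-- ===== VERDICT (by name: the statement is the Claim_ definition above) =====
theorem detectar_duplicados_spec : Claim_equal_detectar_duplicados := by
  intro elementos campo _
  unfold Spec_detectar_duplicados
  exact pvMain elementos campo
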